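-- pv_equiv track=rewrite | github.com/tryswift/try-swift-tokyo | Scripts/fetch_youtube_data.py | match_video_to_session
-- ===== SOURCE A (Python) =====
-- def match_video_to_session(
--     video_title: str, session_titles: list[str]
-- ) -> str | None:
--     """Try to match a YouTube video title to a session title."""
--     video_lower = video_title.lower().strip()
--
--     # Exact match
--     for title in session_titles:
--         if title.lower().strip() == video_lower:
--             return title
--
--     # Partial match (video title contains session title or vice versa)
--     for title in session_titles:
--         title_lower = title.lower().strip()
--         if title_lower in video_lower or video_lower in title_lower:
--             return title
--
--     return None
-- ===== SOURCE B (Python) =====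
-- def match_video_to_session(
--     video_title: str, session_titles: list[str]
-- ) -> str | None:
--     """Single pass: return an exact match immediately; remember the first partial match."""
--     video_lower = video_title.lower().strip()
--     partial = None
--     for title in session_titles:
--         title_lower = title.lower().strip()
--         if title_lower == video_lower:
--             return title
--         if partial is None and (title_lower in video_lower or video_lower in title_lower):
--             partial = title
--     return partial
-- ===== Notes on version B (the rewrite author's own statement) =====
-- stated objective: simpler
-- what changed: Collapses A's two sequential scans (exact pass, then partial pass) into one loop that returns an exact match immediately and remembers the first partial candidate, also normalizing each title once instead of up to twice.
import Mathlib
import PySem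

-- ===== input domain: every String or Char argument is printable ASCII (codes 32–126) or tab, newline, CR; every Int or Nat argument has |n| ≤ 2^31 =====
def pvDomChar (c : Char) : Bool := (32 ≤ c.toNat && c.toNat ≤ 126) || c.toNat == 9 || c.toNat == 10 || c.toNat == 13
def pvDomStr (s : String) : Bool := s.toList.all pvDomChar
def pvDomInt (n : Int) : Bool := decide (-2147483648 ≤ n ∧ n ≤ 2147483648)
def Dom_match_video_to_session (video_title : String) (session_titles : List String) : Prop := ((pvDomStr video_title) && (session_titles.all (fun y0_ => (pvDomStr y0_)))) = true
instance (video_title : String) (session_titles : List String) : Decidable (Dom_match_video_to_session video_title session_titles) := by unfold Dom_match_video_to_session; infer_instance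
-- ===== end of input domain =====

-- B changes A's two sequential scans into one loop (exact match returns at once, first partial is remembered); objective: simpler.

-- ===== PORT A =====
-- title.lower().strip()
def pvNorm (s : String) : String := PySem.Str.strip (PySem.Str.lower s)

-- first loop of A: exact match
def pvExactScan (video_lower : String) : List String → Option String
  | [] => none
  | title :: ts =>
    if pvNorm title = video_lower then some title else pvExactScan video_lower ts

-- second loop of A: partial match
def pvPartialScan (video_lower : String) : List String → Option String
  | [] => none
  | title :: ts =>
    let title_lower := pvNorm title
    if PySem.Str.isIn title_lower video_lower || PySem.Str.isIn video_lower title_lower then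
      some title
    else pvPartialScan video_lower ts

def match_video_to_session (video_title : String) (session_titles : List String) : Option String :=
  let video_lower := pvNorm video_title
  match pvExactScan video_lower session_titles with
  | some t => some t
  | none => pvPartialScan video_lower session_titles

-- ===== PORT B =====
-- single loop over session_titles carrying the first partial candidate
def pvScanB (video_lower : String) (partialC : Option String) : List String → Option String
  | [] => partialC
  | title :: ts =>
    let title_lower := pvNorm title
    if title_lower = video_lower then some title
    else
      pvScanB video_lower
        (if partialC.isNone &&
            (PySem.Str.isIn title_lower video_lower || PySem.Str.isIn video_lower title_lower)
         then some title else partialC) ts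

def match_video_to_session_alt (video_title : String) (session_titles : List String) : Option String :=
  pvScanB (pvNorm video_title) none session_titles

-- ===== PRECONDITION & SPEC =====
def Spec_match_video_to_session (video_title : String) (session_titles : List String) (out : Option String) : Prop := out = match_video_to_session_alt video_title session_titles
instance (video_title : String) (session_titles : List String) (out : Option String) : Decidable (Spec_match_video_to_session video_title session_titles out) := by unfold Spec_match_video_to_session; infer_instance

-- ===== CLAIM (what is proved, stated in full; the proofs are below) =====
def Claim_equal_match_video_to_session : Prop := ∀ (video_title : String) (session_titles : List String), Dom_match_video_to_session video_title session_titles → Spec_match_video_to_session video_title session_titles (match_video_to_session video_title session_titles)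

-- ===== LEMMAS AND PROOFS =====

-- B's loop equals: exact winner if any, else the stored candidate, else A's partial scan
theorem pvScanB_eq (v : String) (ts : List String) (p : Option String) :
    pvScanB v p ts =
      match pvExactScan v ts with
      | some t => some t
      | none => match p with
        | some x => some x
        | none => pvPartialScan v ts := by
  induction ts generalizing p with
  | nil => cases p <;> rfl
  | cons t ts ih =>
    by_cases he : pvNorm t = v
    · simp only [pvScanB, pvExactScan, if_pos he]
    · simp only [pvScanB, pvExactScan, pvPartialScan, if_neg he, ih]
      by_cases hc : (PySem.Str.isIn (pvNorm t) v || PySem.Str.isIn v (pvNorm t)) = true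
      · rw [if_pos hc]
        cases hx : pvExactScan v ts <;> cases p <;>
          simp only [hc, Option.isNone_none, Option.isNone_some, Bool.true_and,
            Bool.false_and, if_true, if_false, Bool.false_eq_true]
      · rw [if_neg hc]; rw [Bool.not_eq_true] at hc
        cases hx : pvExactScan v ts <;> cases p <;>
          simp only [hc, Option.isNone_none, Option.isNone_some, Bool.true_and,
            Bool.false_and, if_false, Bool.false_eq_true]

-- ===== VERDICT (by name: the statement is the Claim_ definition above) =====
theorem match_video_to_session_spec : Claim_equal_match_video_to_session := by
  intro v ts _
  unfold Spec_match_video_to_session match_video_to_session match_video_to_session_alt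
  rw [pvScanB_eq]
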